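-- pv_equiv track=rewrite | github.com/Icln/Algorithm | 프로그래머스/lv2/131127. 할인 행사/할인 행사.py | solution
-- ===== SOURCE A (Python) =====
-- def solution(want, number, discount):
--     l = len(discount)
--     buy = dict()
--     for i in range(len(want)):
--         buy[want[i]] = number[i]
--
--     answer = 0
--     for i in range(l - 9):
--         tmp = discount[i : i + 10]
--         flag = True
--         for j in buy:
--             if buy[j] != tmp.count(j):
--                 flag = False
--                 break
--         if flag:
--             answer += 1
--     return answer
-- ===== SOURCE B (Python) =====
-- def solution(want, number, discount):
--     need = {want[i]: number[i] for i in range(len(want))}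
--     if len(discount) < 10:
--         return 0
--     cnt = dict.fromkeys(need, 0)
--     for item in discount[:10]:
--         if item in cnt:
--             cnt[item] += 1
--     answer = 1 if cnt == need else 0
--     for i in range(10, len(discount)):
--         out = discount[i - 10]
--         if out in cnt:
--             cnt[out] -= 1
--         inc = discount[i]
--         if inc in cnt:
--             cnt[inc] += 1
--         if cnt == need:
--             answer += 1
--     return answer
-- ===== Notes on version B (the rewrite author's own statement) =====
-- stated objective: alternative
-- what changed: Instead of slicing out each 10-item window and recounting every wanted item in it (tmp.count per key per window), B maintains one sliding counter dict updated with a single decrement/increment per step and compares it to the required counts with one dict equality per window.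
import Mathlib
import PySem

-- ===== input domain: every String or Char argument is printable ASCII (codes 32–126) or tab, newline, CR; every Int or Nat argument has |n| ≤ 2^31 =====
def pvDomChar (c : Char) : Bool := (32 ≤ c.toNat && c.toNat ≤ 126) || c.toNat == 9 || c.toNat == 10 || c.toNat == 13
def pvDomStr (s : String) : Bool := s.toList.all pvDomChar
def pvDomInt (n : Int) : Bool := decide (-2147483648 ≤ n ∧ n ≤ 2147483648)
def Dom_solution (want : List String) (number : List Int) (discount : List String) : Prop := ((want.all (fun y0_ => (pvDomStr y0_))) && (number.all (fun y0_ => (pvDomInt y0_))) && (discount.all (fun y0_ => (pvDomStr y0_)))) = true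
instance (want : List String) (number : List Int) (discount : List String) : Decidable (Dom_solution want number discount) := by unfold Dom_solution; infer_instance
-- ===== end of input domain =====

-- B replaces A's per-window slice-and-recount with one sliding counter updated incrementally and a dict comparison per window (objective: alternative algorithm, same asymptotic cost).

-- ===== PORT A =====
-- A's inner loop 'for j in buy: if buy[j] != tmp.count(j): flag = False; break' as structural recursion over the keys
def pvACheck (buy : PySem.Dict String Int) (tmp : List String) : List String → Bool
  | [] => true
  | j :: rest => if buy.getD j 0 != (tmp.count j : Int) then false else pvACheck buy tmp rest

-- literal port of A; want[i]/number[i] via pyGetD (both indices are in range on Pre_solution)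
def solution (want : List String) (number : List Int) (discount : List String) : Int :=
  let l : Int := (discount.length : Int)
  let buy : PySem.Dict String Int :=
    (PySem.List.pyRange 0 (want.length : Int) 1).foldl
      (fun d i => d.insert (PySem.List.pyGetD want i "") (PySem.List.pyGetD number i 0))
      PySem.Dict.empty
  (PySem.List.pyRange 0 (l - 9) 1).foldl
    (fun answer i =>
      let tmp := PySem.List.slice discount (some i) (some (i + 10))
      if pvACheck buy tmp buy.keys then answer + 1 else answer)
    0

-- ===== PORT B =====
-- Python's 'cnt == need' on dicts: same number of keys and same value at each key (order-insensitive)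
def pvDictEq (c d : PySem.Dict String Int) : Bool :=
  c.keys.length == d.keys.length && c.items.all (fun kv => d.get? kv.1 == some kv.2)

-- literal port of B (Source B): need built by the dict comprehension over range(len(want)),
-- then a sliding window counter, one decrement/increment per step
def solution_alt (want : List String) (number : List Int) (discount : List String) : Int :=
  let need : PySem.Dict String Int :=
    (PySem.List.pyRange 0 (want.length : Int) 1).foldl
      (fun d i => d.insert (PySem.List.pyGetD want i "") (PySem.List.pyGetD number i 0))
      PySem.Dict.empty
  if discount.length < 10 then 0
  else
    let cnt0 : PySem.Dict String Int :=
      need.keys.foldl (fun d k => d.insert k 0) PySem.Dict.empty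
    let cnt1 := (PySem.List.slice discount none (some 10)).foldl
      (fun d item => if d.contains item then d.modify item 0 (· + 1) else d) cnt0
    let answer0 : Int := if pvDictEq cnt1 need then 1 else 0
    let r := (PySem.List.pyRange 10 (discount.length : Int) 1).foldl
      (fun (st : PySem.Dict String Int × Int) i =>
        let out := PySem.List.pyGetD discount (i - 10) ""
        let c1 := if st.1.contains out then st.1.modify out 0 (· - 1) else st.1
        let inc := PySem.List.pyGetD discount i ""
        let c2 := if c1.contains inc then c1.modify inc 0 (· + 1) else c1
        (c2, if pvDictEq c2 need then st.2 + 1 else st.2))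
      (cnt1, answer0)
    r.2

-- ===== PRECONDITION & SPEC =====
-- Pre_ excludes exactly the inputs where both programs raise IndexError (number shorter than want)
def Pre_solution (want : List String) (number : List Int) (discount : List String) : Prop :=
  want.length ≤ number.length
instance (want : List String) (number : List Int) (discount : List String) : Decidable (Pre_solution want number discount) := by unfold Pre_solution; infer_instance

def pvWitness_solution : List String × List Int × List String :=
  (["a"], [2], ["a", "a", "b", "a", "b", "b", "b", "b", "b", "b", "a"])

def Spec_solution (want : List String) (number : List Int) (discount : List String) (out : Int) : Prop := out = solution_alt want number discount
instance (want : List String) (number : List Int) (discount : List String) (out : Int) : Decidable (Spec_solution want number discount out) := by unfold Spec_solution; infer_instance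

-- ===== CLAIM (what is proved, stated in full; the proofs are below) =====
def Claim_equal_solution : Prop := ∀ (want : List String) (number : List Int) (discount : List String), Dom_solution want number discount → Pre_solution want number discount → Spec_solution want number discount (solution want number discount)

-- ===== LEMMAS AND PROOFS =====

-- count (as Int) of item k in the window of 10 starting at m
def pvWCount (discount : List String) (m : Int) (k : String) : Int :=
  ((PySem.List.slice discount (some m) (some (m + 10))).count k : Int)

-- the per-window success predicate both programs decide
def pvGood (need : PySem.Dict String Int) (discount : List String) (m : Int) : Bool :=
  need.keys.all (fun k => need.getD k 0 == pvWCount discount m k)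

theorem pvACheck_eq_all (d : PySem.Dict String Int) (tmp : List String) (ks : List String) :
    pvACheck d tmp ks = ks.all (fun j => d.getD j 0 == (tmp.count j : Int)) := by
  induction ks with
  | nil => rfl
  | cons j rest ih =>
    simp only [pvACheck, List.all_cons, ih, bne]
    cases h : (d.getD j 0 == (tmp.count j : Int)) <;> simp [h]

-- the index-loop dict build equals a fold over the zip (under Pre_)
theorem pv_buy_eq_need (want : List String) (number : List Int)
    (h : want.length ≤ number.length) (d : PySem.Dict String Int) :
    (PySem.List.pyRange 0 (want.length : Int) 1).foldl
      (fun d i => d.insert (PySem.List.pyGetD want i "") (PySem.List.pyGetD number i 0)) d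
    = (want.zip number).foldl (fun d kv => d.insert kv.1 kv.2) d := by
  have hmap : (PySem.List.pyRange 0 (want.length : Int) 1).map
      (fun i => (PySem.List.pyGetD want i "", PySem.List.pyGetD number i 0)) = want.zip number := by
    apply List.ext_getElem
    · simp [PySem.List.length_pyRange_one]
      omega
    · intro k h1 h2
      have hk : k < want.length := by
        simpa [PySem.List.length_pyRange_one] using h1
      have hk2 : k < number.length := by omega
      simp only [List.getElem_map, PySem.List.getElem_pyRange_one, List.getElem_zip, zero_add,
        PySem.List.pyGetD_ofNat want k "" hk, PySem.List.pyGetD_ofNat number k 0 hk2]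
  rw [← hmap, List.foldl_map]

theorem pv_nodup_keys_zipfold (ps : List (String × Int)) (d : PySem.Dict String Int)
    (hd : d.keys.Nodup) : (ps.foldl (fun d kv => d.insert kv.1 kv.2) d).keys.Nodup := by
  induction ps generalizing d with
  | nil => exact hd
  | cons p ps ih =>
    simp only [List.foldl_cons]
    exact ih _ (PySem.Dict.nodup_keys_insert _ _ _ hd)

-- dict.fromkeys: keys in order, all values 0
theorem pv_fromkeys_keys (ks : List String) (d : PySem.Dict String Int)
    (hn : ks.Nodup) (hc : ∀ k ∈ ks, d.contains k = false) :
    (ks.foldl (fun d k => d.insert k 0) d).keys = d.keys ++ ks := by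
  induction ks generalizing d with
  | nil => simp
  | cons k ks ih =>
    simp only [List.foldl_cons]
    rw [ih (d.insert k 0) (List.nodup_cons.mp hn).2 (fun k' hk' => by
          rw [PySem.Dict.contains_insert]
          have hne : (k' == k) = false := by
            have : k' ≠ k := fun h => (List.nodup_cons.mp hn).1 (h ▸ hk')
            simp [this]
          simp [hne, hc k' (List.mem_cons_of_mem _ hk')]),
        PySem.Dict.keys_insert_of_not_contains d (0 : Int) (hc k (by simp))]
    simp

theorem pv_fromkeys_getD (ks : List String) (d : PySem.Dict String Int)
    (h0 : ∀ k, d.getD k 0 = 0) (k : String) :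
    (ks.foldl (fun d k => d.insert k 0) d).getD k 0 = 0 := by
  induction ks generalizing d with
  | nil => simpa using h0 k
  | cons k' ks ih =>
    simp only [List.foldl_cons]
    exact ih (d.insert k' 0) (fun x => by
      rw [PySem.Dict.getD_insert]
      split
      · rfl
      · exact h0 x)

-- one conditional 'if x in d: d[x] = f(d[x])' update: keys unchanged, one value changed
theorem pv_update_step (c : PySem.Dict String Int) (x : String) (f : Int → Int) :
    ((if c.contains x then c.modify x 0 f else c).keys = c.keys)
    ∧ (∀ k, (if c.contains x then c.modify x 0 f else c).getD k 0 =
        if c.contains k ∧ k = x then f (c.getD k 0) else c.getD k 0) := by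
  by_cases h : c.contains x
  · refine ⟨?_, ?_⟩
    · rw [if_pos h, PySem.Dict.keys_modify]
      exact PySem.Dict.keys_insert_of_contains _ _ h
    · intro k
      rw [if_pos h, PySem.Dict.getD_modify]
      by_cases hkx : k = x
      · subst hkx; simp [h]
      · simp [hkx]
  · refine ⟨by rw [if_neg h], fun k => ?_⟩
    rw [if_neg h]
    have : ¬ (c.contains k ∧ k = x) := by rintro ⟨hck, rfl⟩; exact absurd hck (by simp [h])
    rw [if_neg this]

-- the initial window fold: counts every wanted item of w into the dict
theorem pv_winfold (w : List String) (c : PySem.Dict String Int) :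
    ((w.foldl (fun d item => if d.contains item then d.modify item 0 (· + 1) else d) c).keys = c.keys)
    ∧ (∀ k, (w.foldl (fun d item => if d.contains item then d.modify item 0 (· + 1) else d) c).getD k 0
        = c.getD k 0 + (if c.contains k then (w.count k : Int) else 0)) := by
  induction w generalizing c with
  | nil => simp
  | cons x w ih =>
    simp only [List.foldl_cons]
    obtain ⟨hkeys, hval⟩ := pv_update_step c x (· + 1)
    have hcont : ∀ k, (if c.contains x then c.modify x 0 (· + 1) else c).contains k = c.contains k := by
      intro k
      have h1 := PySem.Dict.contains_iff_mem_keys (if c.contains x then c.modify x 0 (· + 1) else c) k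
      have h2 := PySem.Dict.contains_iff_mem_keys c k
      rw [hkeys] at h1
      cases hh : (if c.contains x then c.modify x 0 (· + 1) else c).contains k
      · cases hh2 : c.contains k
        · rfl
        · exact absurd (h1.mpr (h2.mp hh2)) (by simp [hh])
      · exact (h2.mpr (h1.mp hh)).symm
    obtain ⟨ihk, ihv⟩ := ih (if c.contains x then c.modify x 0 (· + 1) else c)
    refine ⟨by rw [ihk, hkeys], fun k => ?_⟩
    rw [ihv k, hval k, hcont k, List.count_cons]
    by_cases hck : c.contains k
    · by_cases hxk : k = x
      · subst hxk; simp [hck]; push_cast; ring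
      · have hbx : (k == x) = false := by simp [hxk]
        have hx2 : ¬ x = k := fun h => hxk h.symm
        simp [hck, hxk, hbx, hx2]
    · simp [hck]

-- sliding step: the window count changes by the element leaving and the element entering
theorem pv_count_step (discount : List String) (m : Nat) (h : m + 10 < discount.length)
    (k o e : String) (ho : discount[m]'(by omega) = o) (he : discount[m + 10]'(by omega) = e) :
    pvWCount discount ((m : Int) + 1) k
      = pvWCount discount (m : Int) k
        - (if k = o then 1 else 0)
        + (if k = e then 1 else 0) := by
  subst ho he
  have h1 : ((m : Int) + 1) = ((m + 1 : Nat) : Int) := by push_cast; ring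
  have h2 : (((m + 1 : Nat) : Int) + 10) = ((m + 1 + 10 : Nat) : Int) := by push_cast; ring
  have h3 : ((m : Int) + 10) = ((m + 10 : Nat) : Int) := by push_cast; ring
  unfold pvWCount
  rw [h1, h2, h3, PySem.List.slice_natCast, PySem.List.slice_natCast]
  have e1 : m + 1 + 10 - (m + 1) = 10 := by omega
  have e2 : m + 10 - m = 10 := by omega
  rw [e1, e2]
  have hdrop : discount.drop m = discount[m]'(by omega) :: discount.drop (m + 1) :=
    List.drop_eq_getElem_cons (by omega)
  have e10 : (10 : Nat) = 9 + 1 := by norm_num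
  have hget : (discount.drop (m + 1))[9]? = some (discount[m + 10]'(by omega)) := by
    rw [List.getElem?_drop]
    exact List.getElem?_eq_getElem (by omega)
  have t1 : List.take 10 (discount[m]'(by omega) :: discount.drop (m + 1))
      = discount[m]'(by omega) :: List.take 9 (discount.drop (m + 1)) := by
    rw [e10, List.take_succ_cons]
  have t2 : List.take 10 (discount.drop (m + 1))
      = List.take 9 (discount.drop (m + 1)) ++ [discount[m + 10]'(by omega)] := by
    conv_lhs => rw [e10, List.take_succ]
    rw [hget]
    rfl
  rw [hdrop, t1, t2]
  simp only [List.count_cons, List.count_append, Option.toList_some, List.count_singleton,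
    List.count_nil, beq_iff_eq]
  push_cast
  simp only [eq_comm]
  split_ifs <;> omega

-- dict equality against need decides exactly the window predicate
theorem pv_dicteq_good (need c : PySem.Dict String Int) (discount : List String) (m : Int)
    (hn : need.keys.Nodup) (hk : c.keys = need.keys)
    (hv : ∀ k ∈ need.keys, c.getD k 0 = pvWCount discount m k) :
    pvDictEq c need = pvGood need discount m := by
  have hcn : c.keys.Nodup := hk ▸ hn
  rw [Bool.eq_iff_iff]
  unfold pvDictEq pvGood
  simp only [Bool.and_eq_true, List.all_eq_true, beq_iff_eq, hk, beq_self_eq_true, true_and]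
  constructor
  · intro hall k hkmem
    have hmemc : k ∈ c.keys := hk ▸ hkmem
    obtain ⟨v, hv'⟩ : ∃ v, c.get? k = some v := by
      cases hg : c.get? k
      · exact absurd ((PySem.Dict.get?_eq_none_iff_not_mem_keys c k).mp hg) (by simp [hmemc])
      · exact ⟨_, rfl⟩
    have hitem := PySem.Dict.mem_items_of_get?_eq_some c hv'
    have hneed := hall _ hitem
    have e1 : need.getD k 0 = v := PySem.Dict.getD_of_get?_eq_some need 0 hneed
    have e2 : c.getD k 0 = v := PySem.Dict.getD_of_get?_eq_some c 0 hv'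
    rw [e1, ← e2]
    exact hv k hkmem
  · intro hgood
    intro kv hkv
    have hkm : kv.1 ∈ c.keys := PySem.Dict.mem_keys_of_mem_items c hkv
    have hkmn : kv.1 ∈ need.keys := hk ▸ hkm
    have e2 : c.getD kv.1 0 = kv.2 := by
      have := PySem.Dict.getD_of_mem_items c (k := kv.1) (v := kv.2) (by simpa using hkv) hcn 0
      simpa using this
    obtain ⟨v, hv'⟩ : ∃ v, need.get? kv.1 = some v := by
      cases hg : need.get? kv.1
      · exact absurd ((PySem.Dict.get?_eq_none_iff_not_mem_keys need kv.1).mp hg) (by simp [hkmn])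
      · exact ⟨_, rfl⟩
    have e1 : need.getD kv.1 0 = v := PySem.Dict.getD_of_get?_eq_some need 0 hv'
    rw [hv']
    congr 1
    rw [← e1, hgood kv.1 hkmn, ← hv kv.1 hkmn, e2]

-- the main sliding fold, by induction on the remaining range
theorem pv_mainfold (need : PySem.Dict String Int) (discount : List String)
    (hn : need.keys.Nodup) (fuel : Nat) :
    ∀ (j : Nat) (c : PySem.Dict String Int) (a : Int), discount.length - j = fuel →
      10 ≤ j → j ≤ discount.length → c.keys = need.keys →
      (∀ k ∈ need.keys, c.getD k 0 = pvWCount discount ((j : Int) - 10) k) →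
      ((PySem.List.pyRange (j : Int) (discount.length : Int) 1).foldl
        (fun (st : PySem.Dict String Int × Int) i =>
          let out := PySem.List.pyGetD discount (i - 10) ""
          let c1 := if st.1.contains out then st.1.modify out 0 (· - 1) else st.1
          let inc := PySem.List.pyGetD discount i ""
          let c2 := if c1.contains inc then c1.modify inc 0 (· + 1) else c1
          (c2, if pvDictEq c2 need then st.2 + 1 else st.2))
        (c, a)).2
      = a + ((PySem.List.pyRange (j : Int) (discount.length : Int) 1).countP
              (fun i => pvGood need discount (i - 9)) : Int) := by
  induction fuel with
  | zero =>
    intro j c a hf h10 hjn hk hv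
    have hnj : (discount.length : Int) ≤ (j : Int) := by exact_mod_cast (by omega : discount.length ≤ j)
    rw [PySem.List.pyRange_one_eq_nil hnj]
    simp
  | succ f ih =>
    intro j c a hf h10 hjn hk hv
    have hjlt : j < discount.length := by omega
    have hjlt' : ((j : Int) : Int) < (discount.length : Int) := by exact_mod_cast hjlt
    rw [PySem.List.pyRange_one_cons hjlt']
    simp only [List.foldl_cons, List.countP_cons]
    have hout : PySem.List.pyGetD discount ((j : Int) - 10) "" = discount[j - 10]'(by omega) := by
      have hcast : ((j : Int) - 10) = ((j - 10 : Nat) : Int) := by omega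
      rw [hcast, PySem.List.pyGetD_ofNat _ _ _ (by omega)]
    have hinc : PySem.List.pyGetD discount ((j : Int)) "" = discount[j]'(by omega) := by
      rw [PySem.List.pyGetD_ofNat _ _ _ hjlt]
    rw [hout, hinc]
    set o := discount[j - 10]'(by omega) with ho
    set e := discount[j]'(by omega) with he
    set c1 := if c.contains o then c.modify o 0 (· - 1) else c with hc1
    set c2 := if c1.contains e then c1.modify e 0 (· + 1) else c1 with hc2
    obtain ⟨hk1, hv1⟩ := pv_update_step c o (· - 1)
    obtain ⟨hk2, hv2⟩ := pv_update_step c1 e (· + 1)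
    rw [← hc1] at hk1 hv1
    rw [← hc2] at hk2 hv2
    have hkc1 : c1.keys = need.keys := hk1.trans hk
    have hkc2 : c2.keys = need.keys := hk2.trans hkc1
    have hvnew : ∀ k ∈ need.keys, c2.getD k 0 = pvWCount discount (((j + 1 : Nat) : Int) - 10) k := by
      intro k hkm
      have hcc : c.contains k = true := (PySem.Dict.contains_iff_mem_keys c k).mpr (hk ▸ hkm)
      have hcc1 : c1.contains k = true := (PySem.Dict.contains_iff_mem_keys c1 k).mpr (hkc1 ▸ hkm)
      have hje : discount[j - 10 + 10]'(by omega) = discount[j]'(by omega) := by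
        simp only [show j - 10 + 10 = j from by omega]
      have hstep := pv_count_step discount (j - 10) (by omega) k o e
        (by rw [ho]) (by rw [hje, he])
      have hm1 : ((j - 10 : Nat) : Int) = (j : Int) - 10 := by omega
      have hm2 : ((j : Int) - 10 + 1) = (((j + 1 : Nat) : Int) - 10) := by push_cast; ring
      rw [hm1, hm2] at hstep
      rw [hstep, hv2 k, hv1 k, hcc, hcc1]
      rw [hv k hkm]
      by_cases hke : k = e <;> by_cases hko : k = o
      · rw [if_pos ⟨rfl, hke⟩, if_pos ⟨rfl, hko⟩, if_pos hko, if_pos hke]; try ring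
      · rw [if_pos ⟨rfl, hke⟩, if_neg (fun h => hko h.2), if_neg hko, if_pos hke]; try ring
      · rw [if_neg (fun h => hke h.2), if_pos ⟨rfl, hko⟩, if_pos hko, if_neg hke]; try ring
      · rw [if_neg (fun h => hke h.2), if_neg (fun h => hko h.2), if_neg hko, if_neg hke]; try ring
    have hDE : pvDictEq c2 need = pvGood need discount ((j : Int) - 9) := by
      apply pv_dicteq_good need c2 discount _ hn hkc2
      intro k hkm
      rw [hvnew k hkm]
      congr 1
      push_cast
      ring
    rw [hDE]
    have hcast1 : ((j : Int) + 1) = ((j + 1 : Nat) : Int) := by push_cast; ring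
    rw [hcast1, ih (j + 1) c2 (if pvGood need discount ((j : Int) - 9) then a + 1 else a)
          (by omega) (by omega) (by omega) hkc2 hvnew]
    have hpj : (fun i => pvGood need discount (i - 9)) (j : Int) = pvGood need discount ((j : Int) - 9) := rfl
    cases hg : pvGood need discount ((j : Int) - 9) <;> simp [hg] <;> push_cast <;> ring

-- splitting A's window range into the first window and the shifted rest
theorem pv_range_split (p : Int → Bool) (n : Nat) (h : 10 ≤ n) :
    ((PySem.List.pyRange 0 ((n : Int) - 9) 1).countP p : Int)
      = (if p 0 then 1 else 0)
        + ((PySem.List.pyRange 10 (n : Int) 1).countP (fun i => p (i - 9)) : Int) := by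
  have h' : (10 : Int) ≤ (n : Int) := by exact_mod_cast h
  rw [PySem.List.pyRange_one_append 0 1 ((n : Int) - 9) (by norm_num) (by omega),
      List.countP_append]
  have h1 : PySem.List.pyRange 0 1 1 = [0] := by
    have := PySem.List.pyRange_one_singleton 0
    norm_num at this
    exact this
  rw [h1]
  have h2 : ([(0 : Int)].countP p : Int) = (if p 0 then 1 else 0) := by
    by_cases hp : p 0 <;> simp [List.countP_cons, hp]
  have h3 : ((PySem.List.pyRange 1 ((n : Int) - 9) 1).countP p : Int)
      = ((PySem.List.pyRange 10 (n : Int) 1).countP (fun i => p (i - 9)) : Int) := by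
    rw [PySem.List.pyRange_one 1 ((n : Int) - 9), PySem.List.pyRange_one 10 (n : Int),
        List.countP_map, List.countP_map]
    have ht : ((n : Int) - 9 - 1).toNat = ((n : Int) - 10).toNat := by omega
    rw [ht]
    congr 2
    funext k
    simp only [Function.comp]
    congr 1
    omega
  push_cast
  push_cast at h2 h3
  omega

-- ===== VERDICT (by name: the statement is the Claim_ definition above) =====
theorem solution_spec : Claim_equal_solution := by
  intro want number discount _ hpre
  unfold Pre_solution at hpre
  unfold Spec_solution solution solution_alt
  simp only []
  set need := (PySem.List.pyRange 0 (want.length : Int) 1).foldl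
      (fun d i => d.insert (PySem.List.pyGetD want i "") (PySem.List.pyGetD number i 0))
      PySem.Dict.empty with hneed
  have hn : need.keys.Nodup := by
    rw [hneed, pv_buy_eq_need want number hpre]
    exact pv_nodup_keys_zipfold _ _ PySem.Dict.nodup_keys_empty
  have hzeta : (fun (answer : Int) (i : Int) =>
        let tmp := PySem.List.slice discount (some i) (some (i + 10))
        if pvACheck need tmp need.keys then answer + 1 else answer)
      = (fun (answer : Int) (i : Int) =>
        if (fun i => pvACheck need (PySem.List.slice discount (some i) (some (i + 10))) need.keys) i
        then answer + 1 else answer) := rfl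
  rw [hzeta, PySem.List.foldl_if_add_one
      (fun i => pvACheck need (PySem.List.slice discount (some i) (some (i + 10))) need.keys)]
  have hgood : (fun i => pvACheck need (PySem.List.slice discount (some i) (some (i + 10))) need.keys)
      = fun i => pvGood need discount i := by
    funext i
    rw [pvACheck_eq_all]
    rfl
  rw [hgood]
  by_cases hlen : discount.length < 10
  · have h9 : (discount.length : Int) ≤ 9 := by exact_mod_cast (by omega : discount.length ≤ 9)
    rw [if_pos hlen, PySem.List.pyRange_one_eq_nil (by omega)]
    simp
  · rw [if_neg hlen]
    have hlen' : 10 ≤ discount.length := by omega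
    set cnt0 : PySem.Dict String Int := need.keys.foldl (fun d k => d.insert k 0) PySem.Dict.empty with hcnt0
    have hk0 : cnt0.keys = need.keys := by
      rw [hcnt0]
      have h := pv_fromkeys_keys need.keys PySem.Dict.empty hn (fun k _ => PySem.Dict.contains_empty k)
      rw [h, PySem.Dict.keys_empty]
      simp
    have hv0 : ∀ k, cnt0.getD k 0 = 0 := fun k => by
      rw [hcnt0]
      exact pv_fromkeys_getD need.keys PySem.Dict.empty (fun x => PySem.Dict.getD_empty x 0) k
    obtain ⟨hk1, hv1⟩ := pv_winfold (PySem.List.slice discount none (some 10)) cnt0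
    set cnt1 := (PySem.List.slice discount none (some 10)).foldl
      (fun d item => if d.contains item then d.modify item 0 (· + 1) else d) cnt0 with hcnt1
    have hk1' : cnt1.keys = need.keys := by rw [hcnt1, hk1, hk0]
    have hv1' : ∀ k ∈ need.keys, cnt1.getD k 0 = pvWCount discount (((10 : Nat) : Int) - 10) k := by
      intro k hkm
      have hc : cnt0.contains k = true :=
        (PySem.Dict.contains_iff_mem_keys _ _).mpr (hk0 ▸ hkm)
      rw [hcnt1, hv1 k, hv0 k, hc]
      unfold pvWCount
      rw [show (((10 : Nat) : Int) - 10) = (0 : Int) from by norm_num,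
          PySem.List.slice_toNat discount (by norm_num) (by norm_num),
          PySem.List.slice_to discount (by norm_num)]
      norm_num
    have hmain := pv_mainfold need discount hn (discount.length - 10) 10 cnt1
      (if pvDictEq cnt1 need then 1 else 0) rfl (le_refl 10) hlen' hk1' hv1'
    have hDE1 : pvDictEq cnt1 need = pvGood need discount (((10 : Nat) : Int) - 10) :=
      pv_dicteq_good need cnt1 discount _ hn hk1' hv1'
    norm_num at hmain hDE1
    rw [hmain, hDE1]
    rw [pv_range_split (fun i => pvGood need discount i) discount.length hlen']
    ring
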